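-- pv_equiv track=rewrite | github.com/mathchou/GameOfCycles-3p | main.py | canonicalize_circular
-- ===== SOURCE A (Python) =====
-- def find_longest_circular_runs(vec):
--     n = len(vec)
--     doubled = vec + vec
--     max_run = 0
--     current_run = 0
--     temp_start = 0
--     start_indices = []
--
--     for i, v in enumerate(doubled):
--         if v == 1:
--             if current_run == 0:
--                 temp_start = i
--             current_run += 1
--             if i < n:
--                 if current_run > max_run:
--                     max_run = current_run
--                     start_indices = [temp_start % n]
--                 elif current_run == max_run:
--                     start_indices.append(temp_start % n)
--         else:
--             current_run = 0
--
--     return max_run, list(set(start_indices))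
--
-- def canonicalize_circular(vec):
--     vec = [int(x) for x in vec]
--     if vec.count(1) < vec.count(-1):
--         vec = [-x for x in vec]
--
--     max_run, start_indices = find_longest_circular_runs(vec)
--     if max_run == 0:
--         return tuple(vec)
--
--     n = len(vec)
--     best = None
--     for start in start_indices:
--         rotation = tuple(vec[start:] + vec[:start])
--         if best is None or rotation > best:
--             best = rotation
--     return best
-- ===== SOURCE B (Python) =====
-- def canonicalize_circular(vec):
--     v = [int(x) for x in vec]
--     if v.count(1) < v.count(-1):
--         v = [-x for x in v]
--     n = len(v)
--     # run boundaries by direct index tests: starts and (exclusive) ends of the maximal 1-runs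
--     starts = [i for i in range(n) if v[i] == 1 and (i == 0 or v[i - 1] != 1)]
--     if not starts:
--         return tuple(v)
--     ends = [i + 1 for i in range(n) if v[i] == 1 and (i == n - 1 or v[i + 1] != 1)]
--     m = max(e - s for s, e in zip(starts, ends))
--     return max(tuple(v[s:] + v[:s]) for s, e in zip(starts, ends) if e - s == m)
-- ===== Notes on version B (the rewrite author's own statement) =====
-- stated objective: simpler
-- what changed: A scans a doubled copy of the vector with running max/current/temp-start state and a start-index set, then loops with a best-so-far rotation; B finds run starts and run ends directly by two boundary comprehensions over the vector and takes max() over the rotations of the maximal runs.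
import Mathlib
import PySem

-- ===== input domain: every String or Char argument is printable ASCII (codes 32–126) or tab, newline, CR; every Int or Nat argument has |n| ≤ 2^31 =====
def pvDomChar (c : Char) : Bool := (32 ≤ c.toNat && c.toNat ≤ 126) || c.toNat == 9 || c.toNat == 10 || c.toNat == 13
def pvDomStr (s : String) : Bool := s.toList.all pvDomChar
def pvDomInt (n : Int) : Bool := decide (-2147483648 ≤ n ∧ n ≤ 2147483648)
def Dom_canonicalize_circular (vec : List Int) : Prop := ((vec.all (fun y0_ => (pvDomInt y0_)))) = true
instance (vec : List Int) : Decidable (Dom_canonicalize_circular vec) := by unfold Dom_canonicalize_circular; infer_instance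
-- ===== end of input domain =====

-- B replaces A's stateful scan of the doubled list (whose second half never changes the result)
-- by direct boundary comprehensions over the vector; objective: simpler, same exact value.
def pyListLt : List Int → List Int → Bool
  | _, [] => false
  | [], _ :: _ => true
  | a :: as, b :: bs => if a < b then true else if b < a then false else pyListLt as bs

-- ===== PORT A =====
-- one step of the 'for i, v in enumerate(doubled)' loop; state = (max_run, current_run, temp_start, start_indices)
def flcrStep (n : Int) (st : Int × Int × Int × List Int) (iv : Int × Int) : Int × Int × Int × List Int :=
  let (max_run, current_run, temp_start, start_indices) := st
  let (i, v) := iv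
  if v = 1 then
    let temp_start := if current_run = 0 then i else temp_start
    let current_run := current_run + 1
    if i < n then
      if current_run > max_run then
        (current_run, current_run, temp_start, [PySem.Int.mod temp_start n])
      else if current_run = max_run then
        (max_run, current_run, temp_start, start_indices ++ [PySem.Int.mod temp_start n])
      else (max_run, current_run, temp_start, start_indices)
    else (max_run, current_run, temp_start, start_indices)
  else (max_run, 0, temp_start, start_indices)

def find_longest_circular_runs (vec : List Int) : Int × List Int :=
  let n : Int := vec.length
  let doubled := vec ++ vec
  let st := (PySem.List.enumerate doubled 0).foldl (flcrStep n) (0, 0, 0, [])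
  (st.1, PySem.Set.ofList st.2.2.2)   -- 'list(set(start_indices))'

def canonicalize_circular (vec : List Int) : List Int :=
  let v : List Int := vec.map (fun x => x)          -- [int(x) for x in vec] : identity on ints
  let v := if v.count 1 < v.count (-1) then v.map (fun x => -x) else v
  let r := find_longest_circular_runs v
  if r.1 = 0 then v
  else
    let best := r.2.foldl (fun best start =>
      let rotation := PySem.List.slice v (some start) none ++ PySem.List.slice v none (some start)
      match best with
      | none => some rotation
      | some b => if pyListLt b rotation then some rotation else some b) none
    best.getD []   -- Python's best is never None here (start_indices is nonempty when max_run ≠ 0)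

-- ===== PORT B =====
def canonicalize_circular_alt (vec : List Int) : List Int :=
  let v := if vec.count 1 < vec.count (-1) then vec.map (fun x => -x) else vec
  let n := v.length
  let starts := (List.range n).filter (fun i => v.getD i 0 == 1 && (i == 0 || !(v.getD (i-1) 0 == 1)))
  if starts.isEmpty then v
  else
    let ends := ((List.range n).filter (fun i => v.getD i 0 == 1 && (i == n - 1 || !(v.getD (i+1) 0 == 1)))).map (· + 1)
    let pairs := starts.zip ends
    let m := (pairs.map (fun p => p.2 - p.1)).foldl max 0      -- max(...) over a nonempty list
    match (pairs.filter (fun p => p.2 - p.1 == m)).map (fun p => v.drop p.1 ++ v.take p.1) with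
    | [] => v   -- unreachable: starts is nonempty
    | r :: rs => rs.foldl (fun b r' => if pyListLt b r' then r' else b) r   -- max(...)


-- ===== PRECONDITION & SPEC =====
def Spec_canonicalize_circular (vec : List Int) (out : List Int) : Prop := out = canonicalize_circular_alt vec
instance (vec : List Int) (out : List Int) : Decidable (Spec_canonicalize_circular vec out) := by unfold Spec_canonicalize_circular; infer_instance

-- ===== CLAIM (what is proved, stated in full; the proofs are below) =====
def Claim_equal_canonicalize_circular : Prop := ∀ (vec : List Int), Dom_canonicalize_circular vec → Spec_canonicalize_circular vec (canonicalize_circular vec)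

-- ===== LEMMAS AND PROOFS =====

-- spec-side defs (mirror B's let-bindings)
def cV (P : List Int) : Nat := P.foldl (fun c x => if x = 1 then c + 1 else 0) 0
def startsOf (v : List Int) : List Nat :=
  (List.range v.length).filter (fun i => v.getD i 0 == 1 && (i == 0 || !(v.getD (i-1) 0 == 1)))
def endsOf (v : List Int) : List Nat :=
  ((List.range v.length).filter (fun i => v.getD i 0 == 1 && (i == v.length - 1 || !(v.getD (i+1) 0 == 1)))).map (· + 1)
def pairsOf (v : List Int) : List (Nat × Nat) := (startsOf v).zip (endsOf v)
def mOf (v : List Int) : Nat := ((pairsOf v).map (fun p => p.2 - p.1)).foldl max 0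
def candsOf (v : List Int) : List (Nat × Nat) := (pairsOf v).filter (fun p => p.2 - p.1 == mOf v)

theorem getD_eq_getElem (l : List Int) (i : Nat) (h : i < l.length) (d : Int) :
    l.getD i d = l[i] := by
  simp [List.getD, List.getElem?_eq_getElem h]

theorem cV_snoc (P : List Int) (x : Int) : cV (P ++ [x]) = if x = 1 then cV P + 1 else 0 := by
  simp [cV, List.foldl_append]

theorem cV_ne_zero_iff (P : List Int) (h : P ≠ []) :
    (cV P ≠ 0) ↔ P.getD (P.length - 1) 0 = 1 := by
  induction P using List.reverseRecOn with
  | nil => simp at h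
  | append_singleton Q y ih =>
    rw [cV_snoc]
    have hlen : Q.length + 1 - 1 = Q.length := by omega
    have hget : (Q ++ [y]).getD Q.length 0 = y := by
      simp [List.getD, List.getElem?_append_right]
    rcases eq_or_ne y 1 with hy | hy <;> simp [hy, hlen, hget]

theorem startsOf_snoc (P : List Int) (x : Int) :
    startsOf (P ++ [x]) = startsOf P ++ (if x = 1 ∧ cV P = 0 then [P.length] else []) := by
  unfold startsOf
  rw [List.length_append]
  simp only [List.length_singleton, List.range_succ, List.filter_append]
  congr 1
  · apply List.filter_congr
    intro i hi
    simp only [List.mem_range] at hi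
    have h1 : (P ++ [x]).getD i 0 = P.getD i 0 := by
      rw [List.getD_append _ _ _ _ hi]
    by_cases hi0 : i = 0
    · rw [h1]; simp [hi0]
    · have h2 : i - 1 < P.length := by omega
      rw [h1, List.getD_append _ _ _ _ h2]
  · show List.filter _ [P.length] = _
    have hget : (P ++ [x]).getD P.length 0 = x := by
      simp [List.getD, List.getElem?_append_right]
    by_cases h0 : P.length = 0
    · have hP : P = [] := List.length_eq_zero_iff.mp h0
      subst hP
      rcases eq_or_ne x 1 with hx | hx <;> simp_all [cV, List.getD]
    · have hne : P ≠ [] := by intro h; subst h; simp at h0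
      have hlast : (P ++ [x]).getD (P.length - 1) 0 = P.getD (P.length - 1) 0 :=
        List.getD_append _ _ _ _ (by omega)
      rcases eq_or_ne x 1 with hx | hx
      · by_cases hc : cV P = 0
        · have h3 : ¬ P.getD (P.length - 1) 0 = 1 :=
            (not_iff_not.mpr (cV_ne_zero_iff P hne)).mp (by simpa using hc)
          simp [List.filter_cons, hget, hlast, hx, hc, h0, h3]
          rw [← getD_eq_getElem (P ++ [1]) (P.length - 1) (by simp) 0,
            List.getD_append _ _ _ _ (by omega)]
          exact h3
        · have h3 : P.getD (P.length - 1) 0 = 1 := (cV_ne_zero_iff P hne).mp hc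
          simp [List.filter_cons, hget, hlast, hx, hc, h0, h3]
          rw [← getD_eq_getElem (P ++ [1]) (P.length - 1) (by simp) 0,
            List.getD_append _ _ _ _ (by omega)]
          exact h3
      · simp [List.filter_cons, hget, hx]

theorem endsOf_snoc (P : List Int) (x : Int) :
    endsOf (P ++ [x]) =
      (if x = 1 then (if cV P = 0 then endsOf P else (endsOf P).dropLast) ++ [P.length + 1]
       else endsOf P) := by
  rcases eq_or_ne P [] with hP | hP
  · subst hP
    rcases eq_or_ne x 1 with hx | hx <;> simp [endsOf, hx, cV, List.getD]
  · obtain ⟨m, hm⟩ : ∃ m, P.length = m + 1 := ⟨P.length - 1, by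
      have := List.length_pos_iff.mpr hP; omega⟩
    have hgx : (P ++ [x]).getD P.length 0 = x := by
      simp [List.getD, List.getElem?_append_right]
    have hgm : (P ++ [x]).getD m 0 = P.getD m 0 := List.getD_append _ _ _ _ (by omega)
    have hml : P.length - 1 = m := by omega
    have hcv : cV P = 0 ↔ ¬ P.getD m 0 = 1 := by
      have h1 := cV_ne_zero_iff P hP
      rw [hml] at h1
      exact ⟨fun h hc => (h1.mpr hc) h, fun h => by by_contra hc; exact h (h1.mp hc)⟩
    unfold endsOf
    rw [List.length_append, hm]
    simp only [List.length_singleton]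
    have hsplit : List.range (m + 1 + 1) = List.range m ++ [m] ++ [m + 1] := by
      rw [List.range_succ, List.range_succ]
    have hsplit2 : List.range (m + 1) = List.range m ++ [m] := List.range_succ
    rw [hsplit, hsplit2, List.filter_append, List.filter_append, List.filter_append]
    have hF : (List.range m).filter
          (fun i => (P ++ [x]).getD i 0 == 1 && (i == m + 1 + 1 - 1 || !((P ++ [x]).getD (i+1) 0 == 1)))
        = (List.range m).filter
          (fun i => P.getD i 0 == 1 && (i == m + 1 - 1 || !(P.getD (i+1) 0 == 1))) := by
      apply List.filter_congr
      intro i hi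
      simp only [List.mem_range] at hi
      have g1 : (P ++ [x]).getD i 0 = P.getD i 0 := List.getD_append _ _ _ _ (by omega)
      have g2 : (P ++ [x]).getD (i+1) 0 = P.getD (i+1) 0 := List.getD_append _ _ _ _ (by omega)
      have g3 : (i == m + 1 + 1 - 1) = false := by simp; omega
      have g4 : (i == m + 1 - 1) = false := by simp; omega
      rw [g1, g2, g3, g4]
    rw [hF]
    set F := (List.range m).filter (fun i => P.getD i 0 == 1 && (i == m + 1 - 1 || !(P.getD (i+1) 0 == 1))) with hFdef
    have g5 : (P ++ [x]).getD (m + 1) 0 = x := by rw [← hm]; exact hgx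
    have g6 : (m == m + 1 + 1 - 1) = false := by simp
    have e1 : List.filter (fun i => (P ++ [x]).getD i 0 == 1 && (i == m + 1 + 1 - 1 || !((P ++ [x]).getD (i+1) 0 == 1))) [m]
        = if P.getD m 0 = 1 ∧ ¬ x = 1 then [m] else [] := by
      have hcnd : ((P ++ [x]).getD m 0 == 1 && (m == m + 1 + 1 - 1 || !((P ++ [x]).getD (m+1) 0 == 1)))
          = (decide (P.getD m 0 = 1) && !(decide (x = 1))) := by
        rw [hgm, g5, g6]
        simp [Bool.beq_eq_decide_eq]
      rw [List.filter_singleton, hcnd]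
      by_cases hl : P.getD m 0 = 1 <;> by_cases hx : x = 1 <;> simp [hl, hx]
    have e2 : List.filter (fun i => (P ++ [x]).getD i 0 == 1 && (i == m + 1 + 1 - 1 || !((P ++ [x]).getD (i+1) 0 == 1))) [m+1]
        = if x = 1 then [m+1] else [] := by
      have hcnd : ((P ++ [x]).getD (m+1) 0 == 1 && (m + 1 == m + 1 + 1 - 1 || !((P ++ [x]).getD (m+1+1) 0 == 1)))
          = decide (x = 1) := by
        rw [g5]
        simp [Bool.beq_eq_decide_eq]
      rw [List.filter_singleton, hcnd]
      by_cases hx : x = 1 <;> simp [hx]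
    have e3 : List.filter (fun i => P.getD i 0 == 1 && (i == m + 1 - 1 || !(P.getD (i+1) 0 == 1))) [m]
        = if P.getD m 0 = 1 then [m] else [] := by
      have hcnd : (P.getD m 0 == 1 && (m == m + 1 - 1 || !(P.getD (m+1) 0 == 1)))
          = decide (P.getD m 0 = 1) := by
        simp [Bool.beq_eq_decide_eq]
      rw [List.filter_singleton, hcnd]
      by_cases hl : P.getD m 0 = 1 <;> simp [hl]
    rw [e1, e2, e3]
    rcases eq_or_ne x 1 with hx | hx <;> rcases eq_or_ne (P.getD m 0) 1 with hl | hl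
    · have hc : cV P ≠ 0 := fun h => absurd hl (hcv.mp h)
      rw [if_neg (show ¬(P.getD m 0 = 1 ∧ ¬ x = 1) by tauto), if_pos hl, if_pos hx,
        if_pos hx, if_neg hc]
      simp [List.dropLast_concat, hm]
    · have hc : cV P = 0 := hcv.mpr hl
      rw [if_neg (show ¬(P.getD m 0 = 1 ∧ ¬ x = 1) by tauto), if_neg hl, if_pos hx,
        if_pos hx, if_pos hc]
      simp [hm]
    · rw [if_pos (show P.getD m 0 = 1 ∧ ¬ x = 1 from ⟨hl, hx⟩), if_pos hl, if_neg hx, if_neg hx]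
      simp
    · rw [if_neg (show ¬(P.getD m 0 = 1 ∧ ¬ x = 1) by tauto), if_neg hl, if_neg hx, if_neg hx]
      simp

theorem structF (P : List Int) :
    (startsOf P).length = (endsOf P).length
    ∧ (∀ p ∈ pairsOf P, p.1 < p.2 ∧ p.2 ≤ P.length)
    ∧ (cV P ≠ 0 → (startsOf P).getLast? = some (P.length - cV P)
        ∧ (endsOf P).getLast? = some P.length)
    ∧ cV P ≤ P.length := by
  induction P using List.reverseRecOn with
  | nil => simp [startsOf, endsOf, pairsOf, cV]
  | append_singleton Q y ih =>
    obtain ⟨ih1, ih2, ih3, ih4⟩ := ih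
    unfold pairsOf at *
    simp only [startsOf_snoc, endsOf_snoc, cV_snoc, List.length_append, List.length_singleton]
    rcases eq_or_ne y 1 with hy | hy
    · subst hy
      by_cases hc : cV Q = 0
      · simp only [hc, and_true, ite_true, if_pos trivial]
        refine ⟨by simp [ih1], fun p hp => ?_, fun _ => ?_, by omega⟩
        · rw [List.zip_append (by simp [ih1])] at hp
          rcases List.mem_append.mp hp with h | h
          · have := ih2 p h; constructor <;> omega
          · simp at h
            rw [Prod.ext_iff] at h  -- p = (Q.length, Q.length + 1)
            constructor <;> omega
        · constructor <;> simp
      · have hlast := ih3 hc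
        simp only [hc, ite_true, ite_false, and_true, and_false, if_pos trivial, if_neg (by simp [hc] : ¬ ((1:Int) = 1 ∧ cV Q = 0))]
        have hEne : endsOf Q ≠ [] := by
          intro h; rw [h] at hlast; simp at hlast
        have hS : startsOf Q = (startsOf Q).dropLast ++ [Q.length - cV Q] :=
          (List.dropLast_append_getLast? _ hlast.1).symm
        have hE : endsOf Q = (endsOf Q).dropLast ++ [Q.length] :=
          (List.dropLast_append_getLast? _ hlast.2).symm
        have hlen' : (startsOf Q).dropLast.length = (endsOf Q).dropLast.length := by
          simp [ih1]
        have hZQ : (startsOf Q).zip (endsOf Q)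
            = ((startsOf Q).dropLast).zip ((endsOf Q).dropLast)
              ++ [(Q.length - cV Q, Q.length)] := by
          conv_lhs => rw [hS, hE]
          rw [List.zip_append hlen']
          simp
        refine ⟨?_, fun p hp => ?_, fun _ => ?_, by omega⟩
        · have : 0 < (endsOf Q).length := List.length_pos_iff.mpr hEne
          simp only [List.length_append, List.length_nil, List.length_singleton,
            List.length_dropLast, ih1]
          omega
        · rw [List.append_nil, hS, List.zip_append hlen'] at hp
          rcases List.mem_append.mp hp with h | h
          · have := ih2 p (by rw [hZQ]; exact List.mem_append.mpr (Or.inl h))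
            constructor <;> omega
          · simp at h
            rw [Prod.ext_iff] at h
            constructor <;> omega
        · constructor
          · rw [List.append_nil, hlast.1]; congr 1; omega
          · simp
    · simp only [if_neg hy, if_neg (by simp [hy] : ¬ (y = 1 ∧ cV Q = 0)), List.append_nil]
      refine ⟨ih1, fun p hp => ?_, by simp, by omega⟩
      have := ih2 p hp
      constructor <;> omega

theorem pairsOf_snoc (P : List Int) (x : Int) :
    pairsOf (P ++ [x]) =
      if x = 1 then
        (if cV P = 0 then pairsOf P ++ [(P.length, P.length + 1)]
         else (pairsOf P).dropLast ++ [(P.length - cV P, P.length + 1)])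
      else pairsOf P := by
  obtain ⟨ih1, ih2, ih3, ih4⟩ := structF P
  unfold pairsOf
  rw [startsOf_snoc, endsOf_snoc]
  rcases eq_or_ne x 1 with hx | hx
  · subst hx
    by_cases hc : cV P = 0
    · simp only [hc, ite_true, and_true, if_pos trivial]
      rw [List.zip_append (by simp [ih1])]; simp
    · have hlast := ih3 hc
      have hS : startsOf P = (startsOf P).dropLast ++ [P.length - cV P] :=
        (List.dropLast_append_getLast? _ hlast.1).symm
      have hE : endsOf P = (endsOf P).dropLast ++ [P.length] :=
        (List.dropLast_append_getLast? _ hlast.2).symm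
      have hlen' : (startsOf P).dropLast.length = (endsOf P).dropLast.length := by
        simp [ih1]
      have hZQ : (startsOf P).zip (endsOf P)
          = ((startsOf P).dropLast).zip ((endsOf P).dropLast)
            ++ [(P.length - cV P, P.length)] := by
        conv_lhs => rw [hS, hE]
        rw [List.zip_append hlen']
        simp
      simp only [hc, and_false, ite_false, ite_true, and_true, List.append_nil]
      rw [hZQ, List.dropLast_concat]
      conv_lhs => rw [hS]
      rw [List.zip_append hlen']
      simp
  · simp only [if_neg hx, if_neg (by simp [hx] : ¬ (x = 1 ∧ cV P = 0)), List.append_nil]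

-- max-fold helpers
theorem le_foldl_max (l : List Nat) (a : Nat) : a ≤ l.foldl max a := by
  induction l generalizing a with
  | nil => simp
  | cons b bs ih => exact le_trans (le_max_left a b) (ih (max a b))

theorem mem_le_foldl_max (l : List Nat) (a x : Nat) (hx : x ∈ l) : x ≤ l.foldl max a := by
  induction l generalizing a with
  | nil => simp at hx
  | cons b bs ih =>
    rcases List.mem_cons.mp hx with h | h
    · subst h; exact le_trans (le_max_right a x) (le_foldl_max bs _)
    · exact ih (max a b) h

theorem foldl_max_concat (l : List Nat) (a b : Nat) :
    (l ++ [b]).foldl max a = max (l.foldl max a) b := by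
  rw [List.foldl_append]; rfl

-- m / candidates of a pair list
def mfun (L : List (Nat × Nat)) : Nat := (L.map (fun p => p.2 - p.1)).foldl max 0
def cfun (L : List (Nat × Nat)) : List (Nat × Nat) := L.filter (fun p => p.2 - p.1 == mfun L)

theorem mfun_concat (L : List (Nat × Nat)) (q : Nat × Nat) :
    mfun (L ++ [q]) = max (mfun L) (q.2 - q.1) := by
  simp only [mfun, List.map_append, List.map_singleton]
  exact foldl_max_concat _ _ _

theorem mem_len_le_mfun (L : List (Nat × Nat)) (p : Nat × Nat) (hp : p ∈ L) :
    p.2 - p.1 ≤ mfun L :=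
  mem_le_foldl_max _ _ _ (List.mem_map.mpr ⟨p, hp, rfl⟩)

theorem cfun_concat_gt (L : List (Nat × Nat)) (q : Nat × Nat) (h : mfun L < q.2 - q.1) :
    cfun (L ++ [q]) = [q] := by
  unfold cfun
  rw [mfun_concat, max_eq_right (le_of_lt h), List.filter_append]
  rw [List.filter_eq_nil_iff.mpr, List.filter_singleton]
  · simp
  · intro p hp
    simp only [beq_iff_eq]
    have := mem_len_le_mfun L p hp
    omega

theorem cfun_concat_eq (L : List (Nat × Nat)) (q : Nat × Nat) (h : q.2 - q.1 = mfun L) :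
    cfun (L ++ [q]) = cfun L ++ [q] := by
  unfold cfun
  rw [mfun_concat, show max (mfun L) (q.2 - q.1) = mfun L by omega,
    List.filter_append, List.filter_singleton,
    show (q.2 - q.1 == mfun L) = true by simpa using h]
  rfl

theorem cfun_concat_lt (L : List (Nat × Nat)) (q : Nat × Nat) (h : q.2 - q.1 < mfun L) :
    cfun (L ++ [q]) = cfun L := by
  unfold cfun
  rw [mfun_concat, max_eq_left (le_of_lt h), List.filter_append, List.filter_singleton,
    show (q.2 - q.1 == mfun L) = false by simp only [beq_eq_false_iff_ne]; omega]
  simp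

theorem pairsOf_decomp (P : List Int) (hc : cV P ≠ 0) :
    pairsOf P = (pairsOf P).dropLast ++ [(P.length - cV P, P.length)] := by
  obtain ⟨ih1, ih2, ih3, ih4⟩ := structF P
  have hlast := ih3 hc
  have hS : startsOf P = (startsOf P).dropLast ++ [P.length - cV P] :=
    (List.dropLast_append_getLast? _ hlast.1).symm
  have hE : endsOf P = (endsOf P).dropLast ++ [P.length] :=
    (List.dropLast_append_getLast? _ hlast.2).symm
  have hlen' : (startsOf P).dropLast.length = (endsOf P).dropLast.length := by
    simp [ih1]
  have hZQ : pairsOf P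
      = ((startsOf P).dropLast).zip ((endsOf P).dropLast)
        ++ [(P.length - cV P, P.length)] := by
    unfold pairsOf
    conv_lhs => rw [hS, hE]
    rw [List.zip_append hlen']
    simp
  conv_lhs => rw [hZQ]
  rw [hZQ, List.dropLast_concat]

def stepN (n : Nat) (st : Nat × Nat × Nat × Nat × List Nat) (x : Int) :
    Nat × Nat × Nat × Nat × List Nat :=
  let (i, m, c, t, S) := st
  if x = 1 then
    let t := if c = 0 then i else t
    let c := c + 1
    if i < n then
      if c > m then (i+1, c, c, t, [t])
      else if c = m then (i+1, m, c, t, S ++ [t])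
      else (i+1, m, c, t, S)
    else (i+1, m, c, t, S)
  else (i+1, m, 0, t, S)

theorem master (n : Nat) (P : List Int) (hn : P.length ≤ n) :
    ∃ t, P.foldl (stepN n) (0, 0, 0, 0, []) =
        (P.length, mfun (pairsOf P), cV P, t, (cfun (pairsOf P)).map Prod.fst)
      ∧ (cV P ≠ 0 → t = P.length - cV P) := by
  induction P using List.reverseRecOn with
  | nil =>
    refine ⟨0, by simp [pairsOf, startsOf, endsOf, mfun, cfun, cV], by simp [cV]⟩
  | append_singleton Q y ih =>
    have hQlen : (Q ++ [y]).length = Q.length + 1 := by simp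
    have hQn : Q.length ≤ n := by rw [hQlen] at hn; omega
    obtain ⟨t, hfold, ht⟩ := ih hQn
    have hstep : (Q ++ [y]).foldl (stepN n) (0, 0, 0, 0, []) =
        stepN n (Q.length, mfun (pairsOf Q), cV Q, t, (cfun (pairsOf Q)).map Prod.fst) y := by
      rw [List.foldl_append, hfold]; rfl
    rw [hstep, pairsOf_snoc, cV_snoc, hQlen]
    rcases eq_or_ne y 1 with hy | hy
    · subst hy
      have hin : Q.length < n := by rw [hQlen] at hn; omega
      simp only [ite_true, if_pos trivial]
      by_cases hc : cV Q = 0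
      · simp only [hc, ite_true, if_pos trivial]
        -- new run starts at Q.length; new pair q = (Q.length, Q.length + 1), length 1
        have hq : ((Q.length, Q.length + 1) : Nat × Nat).2 - (Q.length, Q.length + 1).1 = 1 := by
          simp
        rcases Nat.lt_trichotomy (mfun (pairsOf Q)) 1 with hm | hm | hm
        · -- m = 0 : strict new max
          have hm0 : mfun (pairsOf Q) = 0 := by omega
          refine ⟨Q.length, ?_, by omega⟩
          rw [mfun_concat, cfun_concat_gt _ _ (by simpa using hm)]
          simp [stepN, hc, hin, hm0]
        · -- m = 1 : tie
          refine ⟨Q.length, ?_, by omega⟩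
          rw [mfun_concat, cfun_concat_eq _ _ (by simpa using hm.symm)]
          simp [stepN, hc, hin, hm]
        · -- m ≥ 2 : no change
          refine ⟨Q.length, ?_, by omega⟩
          rw [mfun_concat, cfun_concat_lt _ _ (by simpa using hm)]
          have : ¬ (0 + 1 > mfun (pairsOf Q)) := by omega
          have h2 : ¬ (0 + 1 = mfun (pairsOf Q)) := by omega
          simp [stepN, hc, hin, this, h2]
          omega
      · simp only [if_neg hc]
        -- run continues: last pair (s₀, Q.length) becomes (s₀, Q.length + 1)
        have hts : t = Q.length - cV Q := ht hc
        obtain ⟨ih1, ih2, ih3, ih4⟩ := structF Q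
        have hdec := pairsOf_decomp Q hc
        set L0 := (pairsOf Q).dropLast with hL0
        have hplen : ((Q.length - cV Q, Q.length) : Nat × Nat).2 - (Q.length - cV Q, Q.length).1 = cV Q := by
          simp; omega
        have hqlen : ((Q.length - cV Q, Q.length + 1) : Nat × Nat).2 - (Q.length - cV Q, Q.length + 1).1 = cV Q + 1 := by
          simp; omega
        have hm : mfun (pairsOf Q) = max (mfun L0) (cV Q) := by
          conv_lhs => rw [hdec]
          rw [mfun_concat, hplen]
        have hM0le : mfun L0 ≤ mfun (pairsOf Q) := by rw [hm]; exact le_max_left _ _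
        rcases Nat.lt_trichotomy (mfun (pairsOf Q)) (cV Q + 1) with hcmp | hcmp | hcmp
        · -- strict new max
          refine ⟨Q.length - cV Q, ?_, fun _ => by omega⟩
          rw [mfun_concat, cfun_concat_gt _ _ (by rw [hqlen]; omega), hqlen]
          have : max (mfun L0) (cV Q + 1) = cV Q + 1 := max_eq_right (by omega)
          simp [stepN, hc, hin, hts, this, hcmp]
        · -- tie: cV Q + 1 = m, so mfun L0 = m and old last pair was below m
          have hM0 : mfun L0 = mfun (pairsOf Q) := by
            rcases Nat.le_total (mfun L0) (cV Q) with h | h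
            · rw [max_eq_right h] at hm; omega
            · rw [max_eq_left h] at hm; omega
          have hcands : cfun (pairsOf Q) = cfun L0 := by
            conv_lhs => rw [hdec]
            exact cfun_concat_lt _ _ (by rw [hplen]; omega)
          refine ⟨Q.length - cV Q, ?_, fun _ => by omega⟩
          rw [mfun_concat, cfun_concat_eq _ _ (by rw [hqlen]; omega), hqlen]
          have hmx : max (mfun L0) (cV Q + 1) = mfun (pairsOf Q) := by
            rw [hM0, ← hcmp]; exact max_self _
          simp [stepN, hc, hin, hts, hmx, hcands, ← hcmp]
          exact hM0le
        · -- below the max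
          have hM0 : mfun L0 = mfun (pairsOf Q) := by
            rcases Nat.le_total (mfun L0) (cV Q) with h | h
            · rw [max_eq_right h] at hm; omega
            · rw [max_eq_left h] at hm; omega
          have hcands : cfun (pairsOf Q) = cfun L0 := by
            conv_lhs => rw [hdec]
            exact cfun_concat_lt _ _ (by rw [hplen]; omega)
          refine ⟨Q.length - cV Q, ?_, fun _ => by omega⟩
          rw [mfun_concat, cfun_concat_lt _ _ (by rw [hqlen]; omega), hqlen]
          have hmx : max (mfun L0) (cV Q + 1) = mfun (pairsOf Q) := by
            rw [hM0]; exact max_eq_left (by omega)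
          have hgt : ¬ (cV Q + 1 > mfun (pairsOf Q)) := by omega
          have heq : ¬ (cV Q + 1 = mfun (pairsOf Q)) := by omega
          simp [stepN, hc, hin, hts, hmx, hcands, hgt, heq]
    · refine ⟨t, ?_, by simp [hy]⟩
      simp [stepN, hy]
def castQuad (st : Nat × Nat × Nat × Nat × List Nat) : Int × Int × Int × List Int :=
  ((st.2.1 : Int), (st.2.2.1 : Int), (st.2.2.2.1 : Int),
   st.2.2.2.2.map (fun s : Nat => (s : Int)))

theorem stepN_fst (n i m c t : Nat) (S : List Nat) (x : Int) :
    (stepN n (i, m, c, t, S) x).1 = i + 1 := by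
  simp only [stepN]
  split_ifs <;> rfl

theorem stepN_t_le (n i m c t : Nat) (S : List Nat) (x : Int) (h : t ≤ i) :
    (stepN n (i, m, c, t, S) x).2.2.2.1 ≤ i + 1 := by
  simp only [stepN]
  split_ifs <;> simp <;> omega

theorem step_corr (n i m c t : Nat) (S : List Nat) (x : Int) (hti : t ≤ i) :
    flcrStep (n : Int) ((m : Int), (c : Int), (t : Int), S.map (fun s : Nat => (s : Int)))
        ((i : Int), x)
      = castQuad (stepN n (i, m, c, t, S) x) := by
  rcases eq_or_ne x 1 with hx | hx
  · have ht1 : (if (c : Int) = 0 then (i : Int) else (t : Int))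
        = ((if c = 0 then i else t : Nat) : Int) := by
      by_cases hcz : c = 0 <;> simp [hcz]
    by_cases hin : i < n
    · have hinI : (i : Int) < (n : Int) := by exact_mod_cast hin
      have hmod : PySem.Int.mod (if c = 0 then (i : Int) else (t : Int)) (n : Int)
          = (if c = 0 then (i : Int) else (t : Int)) := by
        by_cases hcz : c = 0 <;>
          simp only [hcz, if_true, if_false] <;>
          (rw [PySem.Int.mod_natCast]; congr 1; exact Nat.mod_eq_of_lt (by omega))
      rcases Nat.lt_trichotomy m (c + 1) with hcm | hcm | hcm
      · have hgt : ((c : Int) + 1 > (m : Int)) := by exact_mod_cast hcm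
        simp [flcrStep, stepN, castQuad, hx, hin, hinI, ht1, hmod, hgt, hcm]
      · have hgt : ¬ ((c : Int) + 1 > (m : Int)) := by
          rw [hcm]; push_cast; omega
        have heq : ((c : Int) + 1 = (m : Int)) := by exact_mod_cast hcm.symm
        have hgtN : ¬ (c + 1 > m) := by omega
        simp [flcrStep, stepN, castQuad, hx, hin, hinI, ht1, hmod, hgt, heq, hgtN, hcm.symm]
      · have hgt : ¬ ((c : Int) + 1 > (m : Int)) := by push_cast; omega
        have heq : ¬ ((c : Int) + 1 = (m : Int)) := by push_cast; omega
        have hgtN : ¬ (c + 1 > m) := by omega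
        have heqN : ¬ (c + 1 = m) := by omega
        simp [flcrStep, stepN, castQuad, hx, hin, hinI, ht1, hmod, hgt, heq, hgtN, heqN]
    · have hinI : ¬ ((i : Int) < (n : Int)) := by exact_mod_cast hin
      simp [flcrStep, stepN, castQuad, hx, hin, hinI, ht1]
  · simp [flcrStep, stepN, castQuad, hx]

theorem corr (n : Nat) (w : List Int) : ∀ (st : Nat × Nat × Nat × Nat × List Nat),
    st.2.2.2.1 ≤ st.1 →
    (PySem.List.enumerate w (st.1 : Int)).foldl (flcrStep (n : Int)) (castQuad st)
      = castQuad (w.foldl (stepN n) st) := by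
  induction w with
  | nil => intro st _; simp [PySem.List.enumerate]
  | cons x xs ih =>
    intro st hle
    obtain ⟨i, m, c, t, S⟩ := st
    simp only at hle
    calc (PySem.List.enumerate (x :: xs) ((i : Nat) : Int)).foldl (flcrStep (n : Int))
            (castQuad (i, m, c, t, S))
        = (PySem.List.enumerate xs ((i : Int) + 1)).foldl (flcrStep (n : Int))
            (castQuad (stepN n (i, m, c, t, S) x)) := by
          rw [PySem.List.enumerate_cons, List.foldl_cons]
          congr 1
          exact step_corr n i m c t S x hle
      _ = castQuad (xs.foldl (stepN n) (stepN n (i, m, c, t, S) x)) := by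
          have h2 := ih (stepN n (i, m, c, t, S) x)
            (by rw [stepN_fst]; exact stepN_t_le n i m c t S x hle)
          rw [stepN_fst] at h2
          push_cast at h2 ⊢
          exact h2
      _ = castQuad ((x :: xs).foldl (stepN n) (i, m, c, t, S)) := by rw [List.foldl_cons]

theorem secondHalf (n : Int) (l : List Int) : ∀ (s M C T : Int) (S : List Int),
    n ≤ s →
    ((PySem.List.enumerate l s).foldl (flcrStep n) (M, C, T, S)).1 = M
    ∧ ((PySem.List.enumerate l s).foldl (flcrStep n) (M, C, T, S)).2.2.2 = S := by
  induction l with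
  | nil => intro s M C T S _; simp [PySem.List.enumerate]
  | cons x xs ih =>
    intro s M C T S hns
    rw [PySem.List.enumerate_cons, List.foldl_cons]
    have hlt : ¬ (s < n) := by omega
    rcases eq_or_ne x 1 with hx | hx
    · have hstep : flcrStep n (M, C, T, S) (s, x)
          = (M, C + 1, if C = 0 then s else T, S) := by
        simp [flcrStep, hx, hlt]
      rw [hstep]
      exact ih (s+1) M (C+1) _ S (by omega)
    · have hstep : flcrStep n (M, C, T, S) (s, x) = (M, 0, T, S) := by
        simp [flcrStep, hx]
      rw [hstep]
      exact ih (s+1) M 0 T S (by omega)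

theorem foldl_add_nodup {α : Type} [BEq α] [LawfulBEq α] :
    ∀ (l : List α) (s : List α), l.Nodup → (∀ x ∈ l, ¬ x ∈ s) →
      l.foldl PySem.Set.add s = s ++ l := by
  intro l
  induction l with
  | nil => intro s _ _; simp
  | cons x xs ih =>
    intro s hnd hdis
    rw [List.foldl_cons]
    have hadd : PySem.Set.add s x = s ++ [x] := by
      simp only [PySem.Set.add]
      rw [if_neg]
      simp only [PySem.Set.contains_eq_listContains]
      simp only [List.contains_eq_mem]
      simp [hdis x (by simp)]
    rw [hadd, ih (s ++ [x]) (List.Nodup.of_cons hnd)]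
    · simp
    · intro y hy
      simp only [List.mem_append, List.mem_singleton]
      rintro (h | h)
      · exact hdis y (by simp [hy]) h
      · subst h
        exact (List.nodup_cons.mp hnd).1 hy

theorem set_ofList_eq_self {α : Type} [BEq α] [LawfulBEq α] (l : List α) (h : l.Nodup) :
    PySem.Set.ofList l = l := by
  rw [PySem.Set.ofList_eq_foldl]
  simpa using foldl_add_nodup l [] h (by simp)

theorem flcr_eq (w : List Int) :
    find_longest_circular_runs w
      = (((mfun (pairsOf w) : Nat) : Int),
         PySem.Set.ofList (((cfun (pairsOf w)).map Prod.fst).map (fun s : Nat => (s : Int)))) := by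
  obtain ⟨t, hfold, _⟩ := master w.length w le_rfl
  simp only [find_longest_circular_runs]
  rw [PySem.List.enumerate_append, List.foldl_append]
  have h1 := corr w.length w (0, 0, 0, 0, []) (by simp)
  have hcast : castQuad (0, 0, 0, 0, []) = ((0:Int), (0:Int), (0:Int), ([] : List Int)) := by
    simp [castQuad]
  rw [hcast] at h1
  have h0 : ((0:Nat) : Int) = (0 : Int) := rfl
  rw [h0] at h1
  rw [h1, hfold]
  have h2 := secondHalf (w.length : Int) w ((0 : Int) + (w.length : Int))
    (castQuad (w.length, mfun (pairsOf w), cV w, t, (cfun (pairsOf w)).map Prod.fst)).1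
    (castQuad (w.length, mfun (pairsOf w), cV w, t, (cfun (pairsOf w)).map Prod.fst)).2.1
    (castQuad (w.length, mfun (pairsOf w), cV w, t, (cfun (pairsOf w)).map Prod.fst)).2.2.1
    (castQuad (w.length, mfun (pairsOf w), cV w, t, (cfun (pairsOf w)).map Prod.fst)).2.2.2
    (by omega)
  simp only [castQuad] at h2 ⊢
  rw [h2.1, h2.2]

theorem mfun_zero_iff (v : List Int) : mfun (pairsOf v) = 0 ↔ startsOf v = [] := by
  obtain ⟨ih1, ih2, _, _⟩ := structF v
  constructor
  · intro hm
    by_contra hne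
    obtain ⟨s, rest, hS⟩ := List.exists_cons_of_ne_nil hne
    have hEne : endsOf v ≠ [] := by
      intro h
      rw [hS, h] at ih1; simp at ih1
    obtain ⟨e, erest, hE⟩ := List.exists_cons_of_ne_nil hEne
    have hmem : (s, e) ∈ pairsOf v := by
      unfold pairsOf; rw [hS, hE]; simp [List.zip_cons_cons]
    have h1 := ih2 _ hmem
    have h2 := mem_len_le_mfun _ _ hmem
    simp at h1 h2
    omega
  · intro hS
    unfold mfun pairsOf
    rw [hS]
    simp

theorem foldl_max_attained : ∀ (l : List Nat) (a : Nat), l.foldl max a = a ∨ l.foldl max a ∈ l := by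
  intro l
  induction l with
  | nil => intro a; simp
  | cons b bs ih =>
    intro a
    rw [List.foldl_cons]
    rcases ih (max a b) with h | h
    · rcases max_choice a b with h2 | h2 <;> rw [h2] at h ⊢
      · exact Or.inl h
      · exact Or.inr (by rw [h]; simp)
    · exact Or.inr (by simp [h])

theorem cfun_ne_nil (v : List Int) (h : mfun (pairsOf v) ≠ 0) : cfun (pairsOf v) ≠ [] := by
  rcases foldl_max_attained ((pairsOf v).map (fun p => p.2 - p.1)) 0 with h1 | h1
  · exact absurd h1 h
  · obtain ⟨p, hp, hlen⟩ := List.mem_map.mp h1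
    have : p ∈ cfun (pairsOf v) := by
      unfold cfun
      rw [List.mem_filter]
      refine ⟨hp, by simp only [beq_iff_eq]; exact hlen⟩
    intro hnil
    rw [hnil] at this
    simp at this

theorem foldA_eq (rot : Nat → List Int) : ∀ (l : List Nat) (a : List Int),
    l.foldl (fun b s =>
      match b with
      | none => some (rot s)
      | some bb => if pyListLt bb (rot s) then some (rot s) else some bb) (some a)
    = some ((l.map rot).foldl (fun b r => if pyListLt b r then r else b) a) := by
  intro l
  induction l with
  | nil => intro a; simp
  | cons x xs ih =>
    intro a
    rw [List.foldl_cons, List.map_cons, List.foldl_cons]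
    by_cases hcond : pyListLt a (rot x) <;> simp only [hcond, if_true, if_false, ite_true, ite_false] <;> exact ih _

theorem rot_eq (v : List Int) (s : Nat) :
    PySem.List.slice v (some (s : Int)) none ++ PySem.List.slice v none (some (s : Int))
      = v.drop s ++ v.take s := by
  rw [PySem.List.slice_from_natCast, PySem.List.slice_to_natCast]

-- common middle form
def canonMid (v : List Int) : List Int :=
  if startsOf v = [] then v
  else
    match ((cfun (pairsOf v)).map Prod.fst).map (fun s => v.drop s ++ v.take s) with
    | [] => v
    | r :: rs => rs.foldl (fun b r' => if pyListLt b r' then r' else b) r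

theorem alt_eq_mid (vec : List Int) :
    canonicalize_circular_alt vec
      = canonMid (if vec.count 1 < vec.count (-1) then vec.map (fun x => -x) else vec) := by
  set v := if vec.count 1 < vec.count (-1) then vec.map (fun x => -x) else vec with hv
  have h0 : canonicalize_circular_alt vec
      = (if (startsOf v).isEmpty then v
         else match (cfun (pairsOf v)).map (fun p => v.drop p.1 ++ v.take p.1) with
           | [] => v
           | r :: rs => rs.foldl (fun b r' => if pyListLt b r' then r' else b) r) := rfl
  rw [h0]
  unfold canonMid
  have hmm : ((cfun (pairsOf v)).map Prod.fst).map (fun s => v.drop s ++ v.take s)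
      = (cfun (pairsOf v)).map (fun p => v.drop p.1 ++ v.take p.1) := by
    rw [List.map_map]; rfl
  rw [hmm]
  by_cases hS : startsOf v = []
  · rw [if_pos (show ((startsOf v).isEmpty = true) from by rw [hS]; rfl), if_pos hS]
  · rw [if_neg (show ¬ ((startsOf v).isEmpty = true) from by
        simpa [List.isEmpty_iff] using hS), if_neg hS]

theorem a_eq_mid (vec : List Int) :
    canonicalize_circular vec
      = canonMid (if vec.count 1 < vec.count (-1) then vec.map (fun x => -x) else vec) := by
  have hid : vec.map (fun x => x) = vec := by simp
  simp only [canonicalize_circular, hid]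
  set v := if vec.count 1 < vec.count (-1) then vec.map (fun x => -x) else vec with hv
  obtain ⟨ih1, _, _, _⟩ := structF v
  unfold canonMid
  by_cases hm : mfun (pairsOf v) = 0
  · rw [if_pos (show (find_longest_circular_runs v).1 = 0 from by
        rw [flcr_eq v]
        show ((mfun (pairsOf v) : Nat) : Int) = 0
        exact_mod_cast hm),
      if_pos ((mfun_zero_iff v).mp hm)]
  · have hSne : startsOf v ≠ [] := fun h => hm ((mfun_zero_iff v).mpr h)
    rw [if_neg (show ¬ (find_longest_circular_runs v).1 = 0 from by
        rw [flcr_eq v]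
        intro hcon
        exact hm (by exact_mod_cast (id hcon : ((mfun (pairsOf v) : Nat) : Int) = 0))),
      if_neg hSne]
    have hnodupS : (startsOf v).Nodup := (List.nodup_range).filter _
    have hsub : ((cfun (pairsOf v)).map Prod.fst).Sublist (startsOf v) := by
      have h1 : (cfun (pairsOf v)).Sublist (pairsOf v) := List.filter_sublist
      have h2 := h1.map Prod.fst
      rwa [show (pairsOf v).map Prod.fst = startsOf v from
        List.map_fst_zip (by rw [ih1])] at h2
    have hnodup : (((cfun (pairsOf v)).map Prod.fst).map (fun s : Nat => (s : Int))).Nodup :=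
      ((hnodupS.sublist hsub).map (fun a b h => by exact_mod_cast h))
    rw [show (find_longest_circular_runs v).2
        = ((cfun (pairsOf v)).map Prod.fst).map (fun s : Nat => (s : Int)) from by
      rw [flcr_eq v]; exact set_ofList_eq_self _ hnodup]
    rw [List.foldl_map]
    obtain ⟨y, ys, hY⟩ := List.exists_cons_of_ne_nil
      (show (cfun (pairsOf v)).map Prod.fst ≠ [] by simp [cfun_ne_nil v hm])
    rw [hY, List.foldl_cons, List.map_cons]
    simp only [rot_eq]
    rw [foldA_eq (fun s => v.drop s ++ v.take s) ys (v.drop y ++ v.take y)]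
    rfl

theorem canonicalize_circular_main (vec : List Int) :
    canonicalize_circular vec = canonicalize_circular_alt vec := by
  rw [a_eq_mid, alt_eq_mid]

-- ===== VERDICT (by name: the statement is the Claim_ definition above) =====
theorem canonicalize_circular_spec : Claim_equal_canonicalize_circular := by
  intro vec _
  exact canonicalize_circular_main vec
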